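-- pv_equiv track=rewrite | github.com/ErmishinD/timetable_bot | bot.py | format_day_query
-- ===== SOURCE A (Python) =====
-- def format_pair(item):
--     """Отформатировать вывод информации о паре"""
--     text = ""
--     if item:
--         text += item[1] + " ~ " + item[2] + " - " + item[3]
--         text += " в " + item[4] + " ауд.(" + item[5] + ") - "
--         text += item[6] + ", которую ведет " + item[7] + "\n\n"
--     return text
--
-- def format_day_query(query, week_day):
--     """Отформатировать расписание на день"""
--     text = week_day.upper() + ":\n"
--
--     if query:
--         for item in query:
--             if item[0] == week_day:
--                 text += format_pair(item)
--             else: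
--                 week_day = item[0]
--                 text += "\n\n" + week_day.upper() + ":\n"
--                 text += format_pair(item)
--     else:
--         text += "В этот день у Вас выходной!"
--     return text
-- ===== SOURCE B (Python) =====
-- def _pair_text(item):
--     return (item[1] + " ~ " + item[2] + " - " + item[3]
--             + " в " + item[4] + " ауд.(" + item[5] + ") - "
--             + item[6] + ", которую ведет " + item[7] + "\n\n")
--
-- def _group_runs(query):
--     """Partition query into maximal runs of consecutive items sharing item[0]."""
--     groups = []
--     i = 0
--     n = len(query)
--     while i < n:
--         d = query[i][0]
--         j = i + 1
--         while j < n and query[j][0] == d: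
--             j += 1
--         groups.append((d, query[i:j]))
--         i = j
--     return groups
--
-- def format_day_query(query, week_day):
--     header = week_day.upper() + ":\n"
--     if not query:
--         return header + "В этот день у Вас выходной!"
--     groups = _group_runs(query)
--     d0, items0 = groups[0]
--     parts = [header]
--     if d0 != week_day:
--         parts.append("\n\n" + d0.upper() + ":\n")
--     parts.extend(_pair_text(it) for it in items0)
--     for d, items in groups[1:]:
--         parts.append("\n\n" + d.upper() + ":\n")
--         parts.extend(_pair_text(it) for it in items)
--     return "".join(parts)
-- ===== Notes on version B (the rewrite author's own statement) =====
-- stated objective: alternative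
-- what changed: Replaced A's per-item stateful header-on-change scan by a two-stage group-then-render: query is first partitioned into maximal runs of consecutive same-day items, then runs are rendered with exactly one header each - unconditional for every run after the first, and for the first run only if its day differs from week_day.
import Mathlib
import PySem

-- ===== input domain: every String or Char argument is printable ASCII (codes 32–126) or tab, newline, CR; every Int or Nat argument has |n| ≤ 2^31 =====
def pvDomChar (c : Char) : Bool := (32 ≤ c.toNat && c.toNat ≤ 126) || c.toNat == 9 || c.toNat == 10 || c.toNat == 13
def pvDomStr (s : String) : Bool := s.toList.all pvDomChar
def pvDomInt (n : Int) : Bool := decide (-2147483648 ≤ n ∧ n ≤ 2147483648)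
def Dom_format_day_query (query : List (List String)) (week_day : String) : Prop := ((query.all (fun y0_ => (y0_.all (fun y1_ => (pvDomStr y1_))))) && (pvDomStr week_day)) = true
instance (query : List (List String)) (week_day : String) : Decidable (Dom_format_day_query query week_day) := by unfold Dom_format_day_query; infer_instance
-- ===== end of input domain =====

-- B replaces A's per-item stateful header-on-change scan by a two-stage group-then-render pass (objective: alternative).

-- ===== PORT A =====
def pvFormatPair (item : List String) : String :=
  let text := ""
  if item ≠ [] then
    let text := text ++ ((PySem.List.pyGet? item 1).getD "" ++ " ~ " ++ (PySem.List.pyGet? item 2).getD "" ++ " - " ++ (PySem.List.pyGet? item 3).getD "")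
    let text := text ++ (" в " ++ (PySem.List.pyGet? item 4).getD "" ++ " ауд.(" ++ (PySem.List.pyGet? item 5).getD "" ++ ") - ")
    let text := text ++ ((PySem.List.pyGet? item 6).getD "" ++ ", которую ведет " ++ (PySem.List.pyGet? item 7).getD "" ++ "\n\n")
    text
  else text

def format_day_query (query : List (List String)) (week_day : String) : String :=
  let text := PySem.Str.upper week_day ++ ":\n"
  if query ≠ [] then
    (query.foldl
      (fun (st : String × String) item =>
        if (PySem.List.pyGet? item 0).getD "" = st.2 then
          (st.1 ++ pvFormatPair item, st.2)
        else
          let wd := (PySem.List.pyGet? item 0).getD ""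
          (st.1 ++ ("\n\n" ++ PySem.Str.upper wd ++ ":\n") ++ pvFormatPair item, wd))
      (text, week_day)).1
  else text ++ "В этот день у Вас выходной!"

-- ===== PORT B =====
def pvPairText (item : List String) : String :=
  (PySem.List.pyGet? item 1).getD "" ++ " ~ " ++ (PySem.List.pyGet? item 2).getD "" ++ " - " ++ (PySem.List.pyGet? item 3).getD ""
    ++ " в " ++ (PySem.List.pyGet? item 4).getD "" ++ " ауд.(" ++ (PySem.List.pyGet? item 5).getD "" ++ ") - "
    ++ (PySem.List.pyGet? item 6).getD "" ++ ", которую ведет " ++ (PySem.List.pyGet? item 7).getD "" ++ "\n\n"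

def pvDay (item : List String) : String := (PySem.List.pyGet? item 0).getD ""

def pvHdr (d : String) : String := "\n\n" ++ PySem.Str.upper d ++ ":\n"

-- stage 1 of B: partition query into maximal runs of consecutive items sharing item[0]
def pvGroupRuns : List (List String) → List (String × List (List String))
  | [] => []
  | x :: xs =>
    (pvDay x, x :: xs.takeWhile (fun y => pvDay y == pvDay x))
      :: pvGroupRuns (xs.dropWhile (fun y => pvDay y == pvDay x))
termination_by l => l.length
decreasing_by
  simp only [List.length_cons]
  exact Nat.lt_succ_of_le (List.length_dropWhile_le _ _)

-- stage 2 of B: render groups; the first run's header iff its day ≠ week_day, every later run unconditionally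
def format_day_query_alt (query : List (List String)) (week_day : String) : String :=
  let header := PySem.Str.upper week_day ++ ":\n"
  if query = [] then header ++ "В этот день у Вас выходной!"
  else
    match pvGroupRuns query with
    | [] => header
    | (d0, items0) :: rest =>
      header ++ (if d0 ≠ week_day then pvHdr d0 else "")
        ++ String.join (items0.map pvPairText)
        ++ String.join (rest.map (fun g => pvHdr g.1 ++ String.join (g.2.map pvPairText)))

-- ===== PRECONDITION & SPEC =====
-- Pre_ excludes exactly the inputs on which Python A raises IndexError: any item of
-- length < 8 (item[0] or format_pair's item[1..7] is out of range).
def Pre_format_day_query (query : List (List String)) (week_day : String) : Prop :=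
  ∀ item ∈ query, 8 ≤ item.length
instance (query : List (List String)) (_week_day : String) : Decidable (Pre_format_day_query query _week_day) := by unfold Pre_format_day_query; infer_instance

def pvWitness_format_day_query : List (List String) × String :=
  ([["mon","a","b","c","d","e","f","g"], ["tue","a","b","c","d","e","f","g"]], "mon")

def Spec_format_day_query (query : List (List String)) (week_day : String) (out : String) : Prop := out = format_day_query_alt query week_day
instance (query : List (List String)) (week_day : String) (out : String) : Decidable (Spec_format_day_query query week_day out) := by unfold Spec_format_day_query; infer_instance

-- ===== CLAIM (what is proved, stated in full; the proofs are below) =====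
def Claim_equal_format_day_query : Prop := ∀ (query : List (List String)) (week_day : String), Dom_format_day_query query week_day → Pre_format_day_query query week_day → Spec_format_day_query query week_day (format_day_query query week_day)

-- ===== LEMMAS AND PROOFS =====

-- rendering of groups with an active day, matching A's header-on-change rule
def pvRg : List (String × List (List String)) → String → String
  | [], _ => ""
  | (d, items) :: rest, wd =>
    (if d ≠ wd then pvHdr d else "") ++ String.join (items.map pvPairText) ++ pvRg rest d

theorem pvJoin_cons (a : String) (l : List String) :
    String.join (a :: l) = a ++ String.join l := by
  simp [String.join_eq]

theorem pvPair_eq (item : List String) (h : 8 ≤ item.length) :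
    pvFormatPair item = pvPairText item := by
  have hne : item ≠ [] := by cases item <;> simp_all
  simp [pvFormatPair, pvPairText, hne, String.append_assoc]

-- folding A's step over a run whose items all carry the active day appends just their pair texts
theorem pvFoldRun (run : List (List String)) (wd text : String)
    (h : ∀ y ∈ run, pvDay y = wd ∧ 8 ≤ y.length) :
    (run.foldl
      (fun (st : String × String) item =>
        if (PySem.List.pyGet? item 0).getD "" = st.2 then
          (st.1 ++ pvFormatPair item, st.2)
        else
          let wd := (PySem.List.pyGet? item 0).getD ""
          (st.1 ++ ("\n\n" ++ PySem.Str.upper wd ++ ":\n") ++ pvFormatPair item, wd))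
      (text, wd)) = (text ++ String.join (run.map pvPairText), wd) := by
  induction run generalizing text with
  | nil => simp [String.join]
  | cons y ys ih =>
    obtain ⟨hd, h8⟩ := h y (by simp)
    have hys : ∀ y ∈ ys, pvDay y = wd ∧ 8 ≤ y.length := fun z hz => h z (by simp [hz])
    have hd' : (PySem.List.pyGet? y 0).getD "" = wd := hd
    simp only [List.foldl_cons, hd', if_true, List.map_cons, pvJoin_cons]
    rw [ih _ hys, pvPair_eq y h8, String.append_assoc]

theorem pvFold_eq (q : List (List String)) (text wd : String)
    (h : ∀ item ∈ q, 8 ≤ item.length) :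
    (q.foldl
      (fun (st : String × String) item =>
        if (PySem.List.pyGet? item 0).getD "" = st.2 then
          (st.1 ++ pvFormatPair item, st.2)
        else
          let wd := (PySem.List.pyGet? item 0).getD ""
          (st.1 ++ ("\n\n" ++ PySem.Str.upper wd ++ ":\n") ++ pvFormatPair item, wd))
      (text, wd)).1 = text ++ pvRg (pvGroupRuns q) wd := by
  induction q using pvGroupRuns.induct generalizing text wd with
  | case1 => simp [pvGroupRuns, pvRg]
  | case2 x xs ih =>
    have h8 : 8 ≤ x.length := h x (by simp)
    have hsplit : xs.takeWhile (fun y => pvDay y == pvDay x) ++ xs.dropWhile (fun y => pvDay y == pvDay x) = xs :=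
      List.takeWhile_append_dropWhile
    have hrunmem : ∀ y ∈ xs.takeWhile (fun y => pvDay y == pvDay x), pvDay y = pvDay x ∧ 8 ≤ y.length := by
      intro y hy
      refine ⟨by simpa using List.mem_takeWhile_imp hy,
        h y (List.mem_cons_of_mem _ ((List.takeWhile_sublist _).subset hy))⟩
    have hrest : ∀ item ∈ xs.dropWhile (fun y => pvDay y == pvDay x), 8 ≤ item.length := by
      intro y hy; exact h y (List.mem_cons_of_mem _ ((List.dropWhile_sublist _).subset hy))
    -- one step on x, then the run, then the tail groups
    have hstep :
        (List.foldl
          (fun (st : String × String) item =>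
            if (PySem.List.pyGet? item 0).getD "" = st.2 then
              (st.1 ++ pvFormatPair item, st.2)
            else
              let wd := (PySem.List.pyGet? item 0).getD ""
              (st.1 ++ ("\n\n" ++ PySem.Str.upper wd ++ ":\n") ++ pvFormatPair item, wd))
          (text, wd) (x :: xs)).1
        = (List.foldl
            (fun (st : String × String) item =>
              if (PySem.List.pyGet? item 0).getD "" = st.2 then
                (st.1 ++ pvFormatPair item, st.2)
              else
                let wd := (PySem.List.pyGet? item 0).getD ""
                (st.1 ++ ("\n\n" ++ PySem.Str.upper wd ++ ":\n") ++ pvFormatPair item, wd))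
            (text ++ (if pvDay x ≠ wd then pvHdr (pvDay x) else "") ++ pvPairText x, pvDay x) xs).1 := by
      by_cases hdw : pvDay x = wd
      · subst hdw
        have hcond : (PySem.List.pyGet? x 0).getD "" = pvDay x := rfl
        simp only [List.foldl_cons]
        rw [if_pos hcond, pvPair_eq x h8]
        simp [String.append_assoc]
      · have hcond : ¬ ((PySem.List.pyGet? x 0).getD "" = wd) := hdw
        simp only [List.foldl_cons]
        rw [if_neg hcond, pvPair_eq x h8]
        simp only [pvHdr, hdw, ne_eq, not_false_eq_true, if_true, String.append_assoc]
        rfl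
    rw [hstep, ← hsplit, List.foldl_append]
    rw [pvFoldRun _ (pvDay x) _ hrunmem]
    rw [ih _ _ hrest]
    simp only [pvGroupRuns, pvRg, List.map_cons, pvJoin_cons, String.append_assoc]
    rw [hsplit]

-- the head of a dropWhile fails the predicate
theorem pvDropWhile_head {α : Type} (p : α → Bool) (l : List α) :
    ∀ y ∈ (l.dropWhile p).head?, p y = false := by
  induction l with
  | nil => simp
  | cons a as ih =>
    by_cases h : p a
    · simpa [List.dropWhile, h] using ih
    · simp [List.dropWhile, h]

-- once the active day differs from every run's first day in the chain, every run gets its header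
theorem pvRg_all (q : List (List String)) (d : String)
    (h : ∀ y ∈ q.head?, pvDay y ≠ d) :
    pvRg (pvGroupRuns q) d
      = String.join ((pvGroupRuns q).map (fun g => pvHdr g.1 ++ String.join (g.2.map pvPairText))) := by
  induction q using pvGroupRuns.induct generalizing d with
  | case1 => simp [pvGroupRuns, pvRg, String.join]
  | case2 x xs ih =>
    have hdx : pvDay x ≠ d := h x (by simp)
    have hnext : ∀ y ∈ (xs.dropWhile (fun y => pvDay y == pvDay x)).head?, pvDay y ≠ pvDay x := by
      intro y hy
      have := pvDropWhile_head (fun y => pvDay y == pvDay x) xs y hy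
      simpa using this
    simp only [pvGroupRuns, pvRg, List.map_cons]
    rw [ih _ hnext]
    simp only [pvJoin_cons, String.append_assoc]
    simp [hdx]

-- ===== VERDICT (by name: the statement is the Claim_ definition above) =====
theorem format_day_query_spec : Claim_equal_format_day_query := by
  intro query week_day _hdom hpre
  unfold Spec_format_day_query format_day_query format_day_query_alt
  by_cases hq : query = []
  · simp [hq]
  · simp only [hq, ne_eq, not_false_eq_true, if_true, if_false]
    rw [pvFold_eq query _ week_day hpre]
    cases query with
    | nil => exact absurd rfl hq
    | cons x xs =>
      have hnext : ∀ y ∈ (xs.dropWhile (fun y => pvDay y == pvDay x)).head?, pvDay y ≠ pvDay x := by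
        intro y hy
        have := pvDropWhile_head (fun y => pvDay y == pvDay x) xs y hy
        simpa using this
      simp only [pvGroupRuns, pvRg]
      rw [pvRg_all _ _ hnext]
      simp [String.append_assoc]
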